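-- pv_equiv track=rewrite | github.com/PrassesKhadka/advent-of-code | 2024/day2/solution.py | check
-- ===== SOURCE A (Python) =====
-- def check(arr):
--     if len(arr) < 2:
--         return True
--
--     last=arr[0]
--     inc = arr[1]>arr[0]
--
--     for index,num in enumerate(arr):
--         if index==0: continue
--         diff=num-last if inc else last-num
--
--         if diff<1 or diff>3:
--             return False
--
--         last=num
--     return True
-- ===== SOURCE B (Python) =====
-- def check(arr):
--     diffs = [arr[i + 1] - arr[i] for i in range(len(arr) - 1)]
--     return all(1 <= d <= 3 for d in diffs) or all(-3 <= d <= -1 for d in diffs)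
-- ===== Notes on version B (the rewrite author's own statement) =====
-- stated objective: simpler
-- what changed: Replaces A's direction flag, index-0 skip and stateful single pass with a build-then-test decomposition: compute the consecutive-difference list once, then test it against both monotone ranges with all().
import Mathlib
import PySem

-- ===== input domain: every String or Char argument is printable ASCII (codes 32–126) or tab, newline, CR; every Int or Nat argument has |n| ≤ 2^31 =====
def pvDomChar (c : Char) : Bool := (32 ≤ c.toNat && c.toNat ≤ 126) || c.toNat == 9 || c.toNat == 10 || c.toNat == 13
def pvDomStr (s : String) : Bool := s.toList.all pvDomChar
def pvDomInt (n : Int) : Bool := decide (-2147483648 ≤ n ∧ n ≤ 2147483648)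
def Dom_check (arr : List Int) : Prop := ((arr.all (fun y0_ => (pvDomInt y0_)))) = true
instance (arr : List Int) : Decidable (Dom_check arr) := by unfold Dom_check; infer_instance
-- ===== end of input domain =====

-- B replaces A's direction flag, index-0 skip and stateful pass with a build-then-test
-- decomposition (one diffs list, two all() range tests); objective: simpler.


-- ===== PORT A =====
-- the for-loop over enumerate(arr) with 'if index==0: continue' and early 'return False'
def checkLoop (last : Int) (inc : Bool) : List Int → Bool
  | [] => true
  | num :: rest =>
      let diff := if inc then num - last else last - num
      if diff < 1 ∨ diff > 3 then false else checkLoop num inc rest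

def check (arr : List Int) : Bool :=
  match arr with
  | a0 :: a1 :: rest => checkLoop a0 (decide (a1 > a0)) (a1 :: rest)
  | _ => true   -- len(arr) < 2

-- ===== PORT B =====
-- diffs = [arr[i+1]-arr[i] for i in range(len(arr)-1)] (consecutive pairs via zip with tail)
def check_alt (arr : List Int) : Bool :=
  let diffs := (arr.zip arr.tail).map (fun p : Int × Int => p.2 - p.1)
  diffs.all (fun d => 1 ≤ d ∧ d ≤ 3) || diffs.all (fun d => -3 ≤ d ∧ d ≤ -1)

-- ===== PRECONDITION & SPEC =====
def Spec_check (arr : List Int) (out : Bool) : Prop := out = check_alt arr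
instance (arr : List Int) (out : Bool) : Decidable (Spec_check arr out) := by unfold Spec_check; infer_instance

-- ===== CLAIM (what is proved, stated in full; the proofs are below) =====
def Claim_equal_check : Prop := ∀ (arr : List Int), Dom_check arr → Spec_check arr (check arr)

-- ===== LEMMAS AND PROOFS =====

-- A's increasing-direction pass equals B's first all() over the diffs of prev::l
theorem checkLoop_inc (prev : Int) (l : List Int) :
    checkLoop prev true l
      = (((prev :: l).zip l).map (fun p : Int × Int => p.2 - p.1)).all (fun d => 1 ≤ d ∧ d ≤ 3) := by
  induction l generalizing prev with
  | nil => rfl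
  | cons x xs ih =>
      simp only [checkLoop, if_true, List.zip, List.zipWith_cons_cons, List.map_cons,
        List.all_cons, ih x]
      by_cases h : (1 : Int) ≤ x - prev ∧ x - prev ≤ 3
      · rw [if_neg (by omega),
          show decide ((1:Int) ≤ x - prev ∧ x - prev ≤ 3) = true from by simpa using h,
          Bool.true_and]
      · rw [if_pos (by omega),
          show decide ((1:Int) ≤ x - prev ∧ x - prev ≤ 3) = false from by simpa using h,
          Bool.false_and]

-- A's decreasing-direction pass equals B's second all()
theorem checkLoop_dec (prev : Int) (l : List Int) :
    checkLoop prev false l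
      = (((prev :: l).zip l).map (fun p : Int × Int => p.2 - p.1)).all (fun d => -3 ≤ d ∧ d ≤ -1) := by
  induction l generalizing prev with
  | nil => rfl
  | cons x xs ih =>
      simp only [checkLoop, Bool.false_eq_true, if_false, List.zip, List.zipWith_cons_cons,
        List.map_cons, List.all_cons, ih x]
      by_cases h : (-3 : Int) ≤ x - prev ∧ x - prev ≤ -1
      · rw [if_neg (by omega),
          show decide ((-3:Int) ≤ x - prev ∧ x - prev ≤ -1) = true from by simpa using h,
          Bool.true_and]
      · rw [if_pos (by omega),
          show decide ((-3:Int) ≤ x - prev ∧ x - prev ≤ -1) = false from by simpa using h,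
          Bool.false_and]

-- ===== VERDICT (by name: the statement is the Claim_ definition above) =====
theorem check_spec : Claim_equal_check := by
  intro arr _
  unfold Spec_check check check_alt
  match arr with
  | [] => rfl
  | [_] => rfl
  | a0 :: a1 :: rest =>
      simp only []
      by_cases h : a1 > a0
      · rw [decide_eq_true h, checkLoop_inc]
        simp only [List.zip, List.tail_cons, List.zipWith_cons_cons, List.map_cons, List.all_cons,
          show ¬ ((-3 : Int) ≤ a1 - a0 ∧ a1 - a0 ≤ -1) from by omega, decide_false,
          Bool.false_and, Bool.or_false]
      · rw [decide_eq_false h, checkLoop_dec]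
        simp only [List.zip, List.tail_cons, List.zipWith_cons_cons, List.map_cons, List.all_cons,
          show ¬ ((1 : Int) ≤ a1 - a0 ∧ a1 - a0 ≤ 3) from by omega, decide_false,
          Bool.false_and, Bool.false_or]
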